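-- pv_equiv track=rewrite | github.com/miladsade96/DS_Algo_Code_Snippets | code_snippets/04_Recursion/Number_04.py | word_split
-- ===== SOURCE A (Python) =====
-- from typing import List, AnyStr
--
-- def word_split(phrase: AnyStr, list_of_words: List, output=None) -> List:
--     """
--     Implementation of solution
--     :param phrase: given string
--     :param list_of_words: list containing the words
--     :param output: output parameter to initiate in every recursion
--     :return: a list of words
--     """
--     # check to see any output has been initiated
--     if output is None:
--         output = []
--     # for every word in the list
--     for word in list_of_words:
--         # if the current phrase begins with the word,
--         # we have a split point
--         if phrase.startswith(word):
--             # add the word to the output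
--             output.append(word)
--             # recursively call the split function to the remaining
--             # portion of the string
--             return word_split(phrase[len(word):], list_of_words, output)
--     # returning final output
--     return output
-- ===== SOURCE B (Python) =====
-- def word_split(phrase, list_of_words, output=None):
--     """First-char bucket index + index pointer: group the words by their
--     first character once, then at each position only scan the bucket for
--     the current character (same first-match greedy rule, same mutation of
--     a caller-supplied output list, no suffix copies, no recursion)."""
--     if output is None:
--         output = []
--     buckets = {}
--     for w in list_of_words:
--         if w:
--             buckets.setdefault(w[0], []).append(w)
--     i = 0
--     n = len(phrase)
--     while i < n:
--         word = None
--         for w in buckets.get(phrase[i], []):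
--             if phrase.startswith(w, i):
--                 word = w
--                 break
--         if word is None:
--             return output
--         output.append(word)
--         i += len(word)
--     return output
-- ===== Notes on version B (the rewrite author's own statement) =====
-- stated objective: faster
-- what changed: Replaced the tail recursion that rescans the whole word list and re-slices the phrase at every step with a dict bucketing the words by first character built once, plus an index pointer: each step only scans the bucket of the current character via startswith(w, i), so no suffix strings are built and non-matching words are never examined.
import Mathlib
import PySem

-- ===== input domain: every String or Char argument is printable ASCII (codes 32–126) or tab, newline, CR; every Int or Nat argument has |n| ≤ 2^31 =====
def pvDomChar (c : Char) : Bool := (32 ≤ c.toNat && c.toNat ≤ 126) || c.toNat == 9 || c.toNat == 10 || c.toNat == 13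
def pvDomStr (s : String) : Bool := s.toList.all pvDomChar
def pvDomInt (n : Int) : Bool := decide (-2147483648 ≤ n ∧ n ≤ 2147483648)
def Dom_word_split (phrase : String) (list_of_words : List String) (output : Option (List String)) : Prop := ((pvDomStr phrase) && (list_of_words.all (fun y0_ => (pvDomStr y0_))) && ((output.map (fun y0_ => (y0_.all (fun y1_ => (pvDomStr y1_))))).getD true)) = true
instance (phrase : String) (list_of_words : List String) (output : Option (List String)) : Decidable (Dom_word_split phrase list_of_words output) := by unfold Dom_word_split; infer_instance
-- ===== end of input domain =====

-- B replaces A's tail recursion (rescanning the whole word list and re-slicing the phrase each step) by a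
-- first-character bucket dict built once plus an index pointer; same first-match rule, same return value.
-- Equivalence is about the RETURN value; in Python both versions also append to a caller-supplied output list identically.

-- ===== PORT A =====
-- first word in the list with which the current phrase starts ('for word in list_of_words: if phrase.startswith(word)')
def wordSplitFirst (phrase : List Char) (words : List String) : Option String :=
  match words with
  | [] => none
  | w :: ws => if PySem.Chars.startswith phrase w.toList then some w else wordSplitFirst phrase ws

-- A's recursion, fuel-bounded (fuel = |phrase|+1 suffices inside Pre_, where every matched word is nonempty)
def wordSplitGo (fuel : Nat) (phrase : List Char) (words : List String) (output : List String) : List String :=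
  match fuel with
  | 0 => output
  | fuel + 1 =>
    match wordSplitFirst phrase words with
    | none => output
    | some w => wordSplitGo fuel (phrase.drop w.toList.length) words (output ++ [w])

def word_split (phrase : String) (list_of_words : List String) (output : Option (List String)) : List String :=
  wordSplitGo (phrase.toList.length + 1) phrase.toList list_of_words (output.getD [])

-- ===== PORT B =====
-- 'buckets.setdefault(w[0], []).append(w)' for each nonempty word: group the words by first character
def wordBuckets (words : List String) : PySem.Dict Char (List String) :=
  words.foldl (fun d w =>
    match w.toList with
    | [] => d
    | c :: _ => d.modify c [] (fun ws => ws ++ [w])) PySem.Dict.empty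

-- phrase.startswith(w, i): character-by-character comparison at offset i, no suffix is materialised (exact for 0 ≤ i)
def wordSplitMatchAt (phrase : List Char) (i : Nat) (w : List Char) : Bool :=
  match w with
  | [] => i ≤ phrase.length
  | c :: cs =>
    match phrase[i]? with
    | some d => c == d && wordSplitMatchAt phrase (i + 1) cs
    | none => false

-- B's 'while i < n' loop: look up the bucket of phrase[i] and scan only it; fuel-bounded like A's recursion
def wordSplitAltGo (fuel : Nat) (phrase : List Char) (buckets : PySem.Dict Char (List String))
    (i : Nat) (output : List String) : List String :=
  match fuel with
  | 0 => output
  | fuel + 1 =>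
    match phrase[i]? with
    | none => output
    | some c =>
      match (buckets.getD c []).find? (fun w => wordSplitMatchAt phrase i w.toList) with
      | none => output
      | some w => wordSplitAltGo fuel phrase buckets (i + w.toList.length) (output ++ [w])

def word_split_alt (phrase : String) (list_of_words : List String) (output : Option (List String)) : List String :=
  wordSplitAltGo (phrase.toList.length + 1) phrase.toList (wordBuckets list_of_words) 0 (output.getD [])

-- ===== PRECONDITION & SPEC =====
-- Pre_ excludes lists containing the empty word: there phrase.startswith('') always holds, so A recurses forever
-- and raises RecursionError (A never returns a value on such inputs; B returns output after consuming the phrase).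
def Pre_word_split (_phrase : String) (list_of_words : List String) (_output : Option (List String)) : Prop :=
  "" ∉ list_of_words
instance (phrase : String) (list_of_words : List String) (output : Option (List String)) : Decidable (Pre_word_split phrase list_of_words output) := by unfold Pre_word_split; infer_instance

def pvWitness_word_split : String × List String × Option (List String) := ("abcab", ["ab", "c"], none)

def Spec_word_split (phrase : String) (list_of_words : List String) (output : Option (List String)) (out : List String) : Prop := out = word_split_alt phrase list_of_words output
instance (phrase : String) (list_of_words : List String) (output : Option (List String)) (out : List String) : Decidable (Spec_word_split phrase list_of_words output out) := by unfold Spec_word_split; infer_instance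

-- ===== CLAIM (what is proved, stated in full; the proofs are below) =====
def Claim_equal_word_split : Prop := ∀ (phrase : String) (list_of_words : List String) (output : Option (List String)), Dom_word_split phrase list_of_words output → Pre_word_split phrase list_of_words output → Spec_word_split phrase list_of_words output (word_split phrase list_of_words output)

-- ===== LEMMAS AND PROOFS =====

-- the bucket of c holds exactly the words whose first character is c, in list order
theorem wordBuckets_getD (words : List String) (hw : "" ∉ words) (c : Char) :
    (wordBuckets words).getD c [] = words.filter (fun w => w.toList.head? == some c) := by
  suffices h : ∀ (d : PySem.Dict Char (List String)),
      (words.foldl (fun d w =>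
        match w.toList with
        | [] => d
        | c :: _ => d.modify c [] (fun ws => ws ++ [w])) d).getD c []
      = d.getD c [] ++ words.filter (fun w => w.toList.head? == some c) by
    simpa [wordBuckets, PySem.Dict.getD_empty] using h PySem.Dict.empty
  induction words with
  | nil => intro d; simp
  | cons w ws ih =>
    intro d
    have hwne : w ≠ "" := fun e => hw (e ▸ List.mem_cons_self)
    have hws : "" ∉ ws := fun h' => hw (List.mem_cons_of_mem _ h')
    cases htl : w.toList with
    | nil =>
      exact absurd (by cases w; simp_all) hwne
    | cons c0 rest =>
      by_cases hc : c0 = c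
      · subst hc
        simp only [List.foldl_cons, htl, List.filter_cons]
        rw [ih hws]
        simp
      · simp only [List.foldl_cons, htl, List.filter_cons]
        rw [ih hws]
        simp [PySem.Dict.getD_modify, hc, Ne.symm hc]

-- testing w at offset i is testing w as a prefix of the dropped suffix
set_option maxRecDepth 4096 in
theorem wordSplitMatchAt_eq (phrase w : List Char) (i : Nat) (hi : i ≤ phrase.length) :
    wordSplitMatchAt phrase i w = PySem.Chars.startswith (phrase.drop i) w := by
  induction w generalizing i with
  | nil =>
    have h1 : PySem.Chars.startswith (phrase.drop i) [] = true :=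
      (PySem.Chars.startswith_iff _ _).mpr List.nil_prefix
    simp [wordSplitMatchAt, hi, h1]
  | cons c cs ih =>
    cases hlt : phrase[i]? with
    | none =>
      have hge : phrase.length ≤ i := by
        by_contra h
        exact absurd hlt (by simp [List.getElem?_eq_getElem (by omega : i < phrase.length)])
      have hdrop : phrase.drop i = [] := List.drop_eq_nil_of_le hge
      rw [hdrop]
      have hf : PySem.Chars.startswith ([] : List Char) (c :: cs) = false := by
        rw [Bool.eq_false_iff]
        intro hb
        exact absurd ((PySem.Chars.startswith_iff _ _).mp hb) (by simp)
      simp [wordSplitMatchAt, hlt, hf]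
    | some d =>
      have hlen : i < phrase.length := by
        by_contra h
        simp [List.getElem?_eq_none_iff.mpr (by omega : phrase.length ≤ i)] at hlt
      have hg : phrase[i] = d := by
        rw [List.getElem?_eq_getElem hlen] at hlt
        exact Option.some.inj hlt
      have hdrop : phrase.drop i = d :: phrase.drop (i + 1) := by
        rw [List.drop_eq_getElem_cons hlen, hg]
      have hs : PySem.Chars.startswith (d :: phrase.drop (i + 1)) (c :: cs)
          = ((c == d) && PySem.Chars.startswith (phrase.drop (i + 1)) cs) := by
        apply Bool.eq_iff_iff.mpr
        rw [PySem.Chars.startswith_iff, List.cons_prefix_cons, Bool.and_eq_true, beq_iff_eq,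
          PySem.Chars.startswith_iff]
      rw [hdrop, hs]
      simp only [wordSplitMatchAt, hlt, ih (i + 1) (by omega)]

-- scanning only the bucket of phrase[i] finds the same first match as A's scan of the whole list
theorem bucket_find_eq_first (phrase : List Char) (words : List String) (hw : "" ∉ words)
    (i : Nat) (c : Char) (hc : phrase[i]? = some c) :
    (words.filter (fun w => w.toList.head? == some c)).find?
        (fun w => wordSplitMatchAt phrase i w.toList)
      = wordSplitFirst (phrase.drop i) words := by
  have hlen : i < phrase.length := by
    by_contra h
    simp [List.getElem?_eq_none_iff.mpr (by omega : phrase.length ≤ i)] at hc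
  have hg : phrase[i] = c := by
    rw [List.getElem?_eq_getElem hlen] at hc
    exact Option.some.inj hc
  have hdrop : phrase.drop i = c :: phrase.drop (i + 1) := by
    rw [List.drop_eq_getElem_cons hlen, hg]
  induction words with
  | nil => simp [wordSplitFirst]
  | cons w ws ih =>
    have hwne : w ≠ "" := fun e => hw (e ▸ List.mem_cons_self)
    have hws : "" ∉ ws := fun h' => hw (List.mem_cons_of_mem _ h')
    cases htl : w.toList with
    | nil => exact absurd (by cases w; simp_all) hwne
    | cons c0 rest =>
      have hmatch : wordSplitMatchAt phrase i w.toList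
          = PySem.Chars.startswith (phrase.drop i) w.toList :=
        wordSplitMatchAt_eq phrase w.toList i (by omega)
      by_cases hc0 : c0 = c
      · subst hc0
        rw [List.filter_cons_of_pos (by simp [htl])]
        simp only [List.find?_cons, hmatch, wordSplitFirst]
        cases hsw : PySem.Chars.startswith (phrase.drop i) w.toList with
        | true => simp
        | false => simpa [hsw] using ih hws
      · -- first char differs: w cannot start the suffix, and it is not in the bucket
        have hsw : PySem.Chars.startswith (phrase.drop i) w.toList = false := by
          rw [Bool.eq_false_iff]
          intro hb
          have := (PySem.Chars.startswith_iff _ _).mp hb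
          rw [hdrop, htl] at this
          exact hc0 (List.cons_prefix_cons.mp this).1
        rw [List.filter_cons_of_neg (by simp [htl, hc0])]
        simp only [wordSplitFirst, hsw, Bool.false_eq_true, if_false]
        exact ih hws

-- with no empty word, nothing matches the empty suffix
theorem wordSplitFirst_nil (words : List String) (hw : "" ∉ words) :
    wordSplitFirst [] words = none := by
  induction words with
  | nil => rfl
  | cons w ws ih =>
    have hwne : w ≠ "" := fun e => hw (e ▸ List.mem_cons_self)
    have hws : "" ∉ ws := fun h' => hw (List.mem_cons_of_mem _ h')
    have hsw : PySem.Chars.startswith [] w.toList = false := by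
      rw [Bool.eq_false_iff]
      intro hb
      have := List.prefix_nil.mp ((PySem.Chars.startswith_iff _ _).mp hb)
      exact hwne (by cases w; simp_all)
    simp [wordSplitFirst, hsw, ih hws]

-- a word matched by A's scan is in the list and a prefix of the phrase
theorem first_mem_prefix (phrase : List Char) (words : List String) (w : String)
    (h : wordSplitFirst phrase words = some w) : w ∈ words ∧ w.toList <+: phrase := by
  induction words with
  | nil => simp [wordSplitFirst] at h
  | cons v vs ih =>
    by_cases hv : PySem.Chars.startswith phrase v.toList = true
    · simp [wordSplitFirst, hv] at h
      subst h
      exact ⟨List.mem_cons_self, (PySem.Chars.startswith_iff _ _).mp hv⟩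
    · simp at hv
      simp [wordSplitFirst, hv] at h
      obtain ⟨h1, h2⟩ := ih h
      exact ⟨List.mem_cons_of_mem _ h1, h2⟩

-- main loop invariant: B at pointer i computes what A computes on the suffix phrase.drop i
theorem go_eq (fuel : Nat) (phrase : List Char) (words : List String)
    (hw : "" ∉ words) :
    ∀ (i : Nat) (output : List String), i ≤ phrase.length →
      wordSplitAltGo fuel phrase (wordBuckets words) i output
        = wordSplitGo fuel (phrase.drop i) words output := by
  induction fuel with
  | zero => intro i output _; rfl
  | succ fuel ih =>
    intro i output hi
    rw [wordSplitAltGo, wordSplitGo]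
    cases hc : phrase[i]? with
    | none =>
      have hge : phrase.length ≤ i := by
        by_contra h
        exact absurd hc (by simp [List.getElem?_eq_getElem (by omega : i < phrase.length)])
      rw [List.drop_eq_nil_of_le hge, wordSplitFirst_nil words hw]
    | some c =>
      simp only [wordBuckets_getD words hw c, bucket_find_eq_first phrase words hw i c hc]
      cases hf : wordSplitFirst (phrase.drop i) words with
      | none => rfl
      | some w =>
        obtain ⟨hmem, hpre⟩ := first_mem_prefix _ _ _ hf
        have hlen : w.toList.length ≤ phrase.length - i := by
          simpa [List.length_drop] using hpre.length_le
        show wordSplitAltGo fuel phrase (wordBuckets words) (i + w.toList.length) (output ++ [w])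
            = wordSplitGo fuel ((phrase.drop i).drop w.toList.length) words (output ++ [w])
        rw [ih (i + w.toList.length) (output ++ [w]) (by omega)]
        simp [List.drop_drop]

-- ===== VERDICT (by name: the statement is the Claim_ definition above) =====
theorem word_split_spec : Claim_equal_word_split := by
  intro phrase words output _ hpre
  unfold Spec_word_split word_split word_split_alt
  rw [go_eq (phrase.toList.length + 1) phrase.toList words hpre 0 (output.getD []) (by omega)]
  simp
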